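-- pv_equiv track=rewrite | github.com/gouthgouthgouth/benchmarkDT | benchmark/simulator.py | gen_ids
-- ===== SOURCE A (Python) =====
-- import string
-- from itertools import product, islice
--
-- def gen_ids(n):
--     """Generate n short unique string identifiers drawn from the lowercase alphabet.
--
--     Uses single letters first (a–z), then two-letter combinations (aa, ab, …)
--     to keep IDs as short as possible.
--
--     Args:
--         n (int): Number of identifiers to generate.
--
--     Returns:
--         list[str]: List of n unique string IDs.
--     """
--     alphabet = string.ascii_lowercase
--     result = []
--     length = 1
--     while len(result) < n:
--         remaining = n - len(result)
--         result.extend(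
--             map(lambda t: ''.join(t),
--                 islice(product(alphabet, repeat=length), remaining))
--         )
--         length += 1
--     return result
-- ===== SOURCE B (Python) =====
-- def gen_ids(n):
--     """Generate n short unique string identifiers in bijective base-26 order."""
--     result = []
--     for i in range(n):
--         k = i + 1
--         s = ''
--         while k:
--             k, r = divmod(k - 1, 26)
--             s = chr(ord('a') + r) + s
--         result.append(s)
--     return result
-- ===== Notes on version B (the rewrite author's own statement) =====
-- stated objective: simpler
-- what changed: Replaces the batched itertools.product/islice enumeration by length with a direct per-index bijective base-26 encoding of each index (repeated divmod), one short loop per id.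
import Mathlib
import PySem

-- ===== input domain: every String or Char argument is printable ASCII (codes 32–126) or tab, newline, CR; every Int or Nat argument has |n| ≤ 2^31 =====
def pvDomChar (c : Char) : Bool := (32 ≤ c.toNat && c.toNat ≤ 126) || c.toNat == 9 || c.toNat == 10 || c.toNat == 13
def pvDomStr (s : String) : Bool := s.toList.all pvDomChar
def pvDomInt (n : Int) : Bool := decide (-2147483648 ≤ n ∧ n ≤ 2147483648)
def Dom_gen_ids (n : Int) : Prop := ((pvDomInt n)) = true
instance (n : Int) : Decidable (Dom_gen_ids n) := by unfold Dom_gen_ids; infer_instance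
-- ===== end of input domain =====

-- B replaces A's batched itertools.product/islice enumeration with a per-index
-- bijective base-26 encoding of i+1; objective: simpler (no speed claim).

-- ===== PORT A =====
-- string.ascii_lowercase
def pvAlphabet : List Char := "abcdefghijklmnopqrstuvwxyz".toList

-- itertools.product(alphabet, repeat=l), each tuple as a list of chars
def pvProd : Nat → List (List Char)
  | 0 => [[]]
  | l+1 => pvAlphabet.flatMap (fun c => (pvProd l).map (fun t => c :: t))

-- termination helper for the while loop: each batch is nonempty
theorem pvProd_ne_nil (l : Nat) : pvProd l ≠ [] := by
  induction l with
  | zero => simp [pvProd]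
  | succ l ih =>
    intro hcontra
    rw [pvProd, List.flatMap_eq_nil_iff] at hcontra
    have := hcontra 'a' (by decide)
    rw [List.map_eq_nil_iff] at this
    exact ih this

-- the while loop of A, state (result, length)
def genLoop (n : Int) (result : List String) (length : Nat) : List String :=
  if h : (result.length : Int) < n then
    let remaining := (n - result.length).toNat
    genLoop n (result ++ ((pvProd length).take remaining).map (fun t => String.ofList t)) (length+1)
  else result
termination_by (n - result.length).toNat
decreasing_by
  have h1 : (pvProd length).length ≠ 0 := by
    simpa [List.length_eq_zero_iff] using pvProd_ne_nil length
  have h2 : 0 < (((pvProd length).take (n - result.length).toNat).map (fun t => String.ofList t)).length := by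
    simp only [List.length_map, List.length_take]
    omega
  simp only [List.length_append]
  omega

def gen_ids (n : Int) : List String := genLoop n [] 1

-- ===== PORT B =====
-- the inner while loop of B: while k: k, r = divmod(k-1, 26); s = chr(97+r) + s
def encLoop (k : Nat) (s : List Char) : List Char :=
  if k = 0 then s else encLoop ((k-1)/26) (Char.ofNat (97 + (k-1) % 26) :: s)
termination_by k
decreasing_by
  have := Nat.div_le_self (k-1) 26
  omega

def gen_ids_alt (n : Int) : List String :=
  (List.range n.toNat).foldl (fun acc i => acc ++ [String.ofList (encLoop (i+1) [])]) []

-- ===== PRECONDITION & SPEC =====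
def Spec_gen_ids (n : Int) (out : List String) : Prop := out = gen_ids_alt n
instance (n : Int) (out : List String) : Decidable (Spec_gen_ids n out) := by unfold Spec_gen_ids; infer_instance

-- ===== CLAIM (what is proved, stated in full; the proofs are below) =====
def Claim_equal_gen_ids : Prop := ∀ (n : Int), Dom_gen_ids n → Spec_gen_ids n (gen_ids n)

-- ===== LEMMAS AND PROOFS =====

-- B's list of the first m ids
def pvF (m : Nat) : List String := (List.range m).map (fun i => String.ofList (encLoop (i+1) []))

-- number of ids strictly shorter than length l (l ≥ 1): 26 + 26^2 + … + 26^(l-1)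
def pvOff : Nat → Nat
  | 0 => 0
  | 1 => 0
  | (l+2) => pvOff (l+1) + 26^(l+1)

-- the j-th (lex) string of length l, most-significant digit first (A's product order)
def pvSpecL : Nat → Nat → List Char
  | 0, _ => []
  | (l+1), j => Char.ofNat (97 + j / 26^l) :: pvSpecL l (j % 26^l)

-- same string, peeling the least-significant digit (B's encoding order)
def pvSpecR : Nat → Nat → List Char
  | 0, _ => []
  | (l+1), j => pvSpecR l (j / 26) ++ [Char.ofNat (97 + j % 26)]

theorem pvOff_two_add (l : Nat) : pvOff (l+2) = pvOff (l+1) + 26^(l+1) := rfl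

theorem pvOff_closed : ∀ l : Nat, 25 * pvOff (l+1) + 26 = 26^(l+1) := by
  intro l
  induction l with
  | zero => decide
  | succ t ih =>
    rw [pvOff_two_add, pow_succ 26 (t+1)]
    generalize hQ : (26:Nat)^(t+1) = Q at ih ⊢
    omega

theorem pvOff_succ (l : Nat) (h : 1 ≤ l) : pvOff (l+1) = 26 * (pvOff l + 1) := by
  obtain ⟨t, rfl⟩ : ∃ t, l = t + 1 := ⟨l - 1, by omega⟩
  have h1 := pvOff_closed t
  have h2 := pvOff_closed (t+1)
  rw [pvOff_two_add] at h2 ⊢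
  omega

theorem encLoop_zero (s : List Char) : encLoop 0 s = s := by
  rw [encLoop]
  simp

theorem encLoop_succ (k : Nat) (s : List Char) :
    encLoop (k+1) s = encLoop (k/26) (Char.ofNat (97 + k % 26) :: s) := by
  rw [encLoop]
  simp

theorem foldl_snoc {α β : Type} (f : α → β) : ∀ (xs : List α) (acc : List β),
    xs.foldl (fun a i => a ++ [f i]) acc = acc ++ xs.map f := by
  intro xs
  induction xs with
  | nil => simp
  | cons x xs ih => intro acc; simp [List.foldl_cons, ih]

theorem range_mul_flatMap {α : Type} (b : Nat) (f : Nat → α) : ∀ (a : Nat),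
    (List.range (a*b)).map f
      = (List.range a).flatMap (fun i => (List.range b).map (fun j => f (i*b + j))) := by
  intro a
  induction a with
  | zero => simp
  | succ a ih =>
    have h : (a+1)*b = a*b + b := by ring
    rw [h, List.range_add, List.map_append, List.range_succ, List.flatMap_append, ih]
    simp [List.map_map, Function.comp]

-- A's batch of length l in closed form
theorem pvProd_eq (l : Nat) : pvProd l = (List.range (26^l)).map (pvSpecL l) := by
  induction l with
  | zero => simp [pvProd, pvSpecL]
  | succ l ih =>
    have halpha : pvAlphabet = (List.range 26).map (fun i => Char.ofNat (97 + i)) := by decide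
    have hmul : (26:Nat)^(l+1) = 26 * 26^l := by rw [pow_succ]; ring
    rw [pvProd, ih, halpha, hmul, range_mul_flatMap, List.flatMap_map]
    apply List.flatMap_congr
    intro x hx
    rw [List.map_map]
    apply List.map_congr_left
    intro j hj
    rw [List.mem_range] at hj
    have hK : 0 < (26:Nat)^l := pow_pos (by norm_num) l
    have hdiv : (x * 26^l + j) / 26^l = x := by
      rw [mul_comm x, Nat.mul_add_div hK, Nat.div_eq_of_lt hj, Nat.add_zero]
    have hmod : (x * 26^l + j) % 26^l = j := by
      rw [mul_comm x, Nat.mul_add_mod, Nat.mod_eq_of_lt hj]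
    show Char.ofNat (97 + x) :: pvSpecL l j = pvSpecL (l+1) (x * 26^l + j)
    rw [pvSpecL, hdiv, hmod]

theorem pvSpecL_snoc : ∀ (l j : Nat), j < 26^(l+1) →
    pvSpecL (l+1) j = pvSpecL l (j / 26) ++ [Char.ofNat (97 + j % 26)] := by
  intro l
  induction l with
  | zero =>
    intro j hj
    rw [pow_one] at hj
    simp [pvSpecL, Nat.mod_eq_of_lt hj]
  | succ l ih =>
    intro j hj
    have hK : 0 < (26:Nat)^(l+1) := pow_pos (by norm_num) _
    have hmm : j % 26^(l+1) % 26 = j % 26 :=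
      Nat.mod_mod_of_dvd j (dvd_pow_self 26 (Nat.succ_ne_zero l))
    have hdd : j / 26 / 26^l = j / 26^(l+1) := by
      rw [Nat.div_div_eq_div_mul, ← pow_succ']
    have hmd : j % 26^(l+1) / 26 = j / 26 % 26^l := by
      rw [show (26:Nat)^(l+1) = 26 * 26^l by rw [pow_succ']]
      exact Nat.mod_mul_right_div_self j 26 (26^l)
    rw [pvSpecL, ih (j % 26^(l+1)) (Nat.mod_lt j hK), hmm, hmd]
    rw [show pvSpecL (l+1) (j/26) = Char.ofNat (97 + (j/26) / 26^l) :: pvSpecL l ((j/26) % 26^l) from rfl]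
    rw [hdd]
    rfl

theorem pvSpecL_eq_R : ∀ (l j : Nat), j < 26^l → pvSpecL l j = pvSpecR l j := by
  intro l
  induction l with
  | zero => intro j _; rfl
  | succ l ih =>
    intro j hj
    have hj' : j / 26 < 26^l := Nat.div_lt_of_lt_mul (by rwa [pow_succ'] at hj)
    rw [pvSpecL_snoc l j hj, pvSpecR, ih (j/26) hj']

-- B's encoding of pvOff l + j + 1 is A's j-th string of length l
theorem encLoop_spec : ∀ (t : Nat), ∀ (j : Nat) (s : List Char), j < 26^(t+1) →
    encLoop (pvOff (t+1) + j + 1) s = pvSpecR (t+1) j ++ s := by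
  intro t
  induction t with
  | zero =>
    intro j s hj
    rw [pow_one] at hj
    have h1 : pvOff (0+1) + j + 1 = j + 1 := by
      have : pvOff (0+1) = 0 := rfl
      omega
    rw [h1, encLoop_succ, Nat.div_eq_of_lt hj, encLoop_zero]
    rfl
  | succ t ih =>
    intro j s hj
    have hsucc : pvOff (t+2) = 26 * (pvOff (t+1) + 1) := pvOff_succ (t+1) (by omega)
    have hj' : j / 26 < 26^(t+1) := Nat.div_lt_of_lt_mul (by rwa [pow_succ'] at hj)
    rw [show pvOff (t+2) + j + 1 = (pvOff (t+2) + j) + 1 from rfl, encLoop_succ]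
    have hmod : (pvOff (t+2) + j) % 26 = j % 26 := by rw [hsucc, Nat.mul_add_mod]
    have hdiv : (pvOff (t+2) + j) / 26 = pvOff (t+1) + j/26 + 1 := by
      rw [hsucc, Nat.mul_add_div (by norm_num)]
      omega
    rw [hmod, hdiv, ih (j/26) _ hj']
    rw [show pvSpecR (t+2) j = pvSpecR (t+1) (j/26) ++ [Char.ofNat (97 + j % 26)] from rfl]
    simp

theorem pvF_add (a K : Nat) :
    pvF (a + K) = pvF a ++ (List.range K).map (fun j => String.ofList (encLoop (a + j + 1) [])) := by
  unfold pvF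
  rw [List.range_add, List.map_append, List.map_map]
  rfl

-- appending one batch of A extends B's list
theorem batch_eq (t r : Nat) :
    pvF (pvOff (t+1)) ++ ((pvProd (t+1)).take r).map (fun x => String.ofList x)
      = pvF (pvOff (t+1) + min r (26^(t+1))) := by
  rw [pvProd_eq, pvF_add, ← List.map_take, List.take_range]
  congr 1
  rw [List.map_map]
  apply List.map_congr_left
  intro j hj
  rw [List.mem_range] at hj
  have hjK : j < 26^(t+1) := lt_of_lt_of_le hj (min_le_right _ _)
  show String.ofList (pvSpecL (t+1) j) = String.ofList (encLoop (pvOff (t+1) + j + 1) [])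
  rw [encLoop_spec t j [] hjK, List.append_nil, pvSpecL_eq_R (t+1) j hjK]

theorem genLoop_step (n : Int) (res : List String) (l : Nat) (h : (res.length : Int) < n) :
    genLoop n res l
      = genLoop n (res ++ ((pvProd l).take (n - res.length).toNat).map (fun t => String.ofList t)) (l+1) := by
  conv_lhs => rw [genLoop.eq_def]
  rw [dif_pos h]

theorem genLoop_exit (n : Int) (res : List String) (l : Nat) (h : ¬ (res.length : Int) < n) :
    genLoop n res l = res := by
  conv_lhs => rw [genLoop.eq_def]
  rw [dif_neg h]

theorem loop_eq : ∀ (k : Nat) (n : Int) (l : Nat), 1 ≤ l → (pvOff l : Int) < n →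
    n.toNat - pvOff l ≤ k → genLoop n (pvF (pvOff l)) l = pvF n.toNat := by
  intro k
  induction k with
  | zero => intro n l _ h2 h3; omega
  | succ k ih =>
    intro n l hl hlt hk
    obtain ⟨t, rfl⟩ : ∃ t, l = t + 1 := ⟨l - 1, by omega⟩
    have hlen : (pvF (pvOff (t+1))).length = pvOff (t+1) := by simp [pvF]
    have hcond : ((pvF (pvOff (t+1))).length : Int) < n := by rw [hlen]; exact hlt
    have hK : 0 < (26:Nat)^(t+1) := pow_pos (by norm_num) _
    rw [genLoop_step n _ (t+1) hcond, hlen]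
    have hr : (n - (pvOff (t+1) : Int)).toNat = n.toNat - pvOff (t+1) := by omega
    rw [hr, batch_eq]
    by_cases hcase : n.toNat ≤ pvOff (t+1) + 26^(t+1)
    · have heq : pvOff (t+1) + min (n.toNat - pvOff (t+1)) (26^(t+1)) = n.toNat := by omega
      rw [heq]
      apply genLoop_exit
      have : (pvF n.toNat).length = n.toNat := by simp [pvF]
      rw [this]
      omega
    · have heq : pvOff (t+1) + min (n.toNat - pvOff (t+1)) (26^(t+1)) = pvOff (t+2) := by
        rw [pvOff_two_add]; omega
      rw [heq]
      have h2n : pvOff (t+2) = pvOff (t+1) + 26^(t+1) := pvOff_two_add t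
      apply ih n (t+2) (by omega)
      · omega
      · omega

theorem gen_ids_alt_eq (n : Int) : gen_ids_alt n = pvF n.toNat := by
  unfold gen_ids_alt pvF
  rw [foldl_snoc]
  simp

-- ===== VERDICT (by name: the statement is the Claim_ definition above) =====
theorem gen_ids_spec : Claim_equal_gen_ids := by
  intro n _
  unfold Spec_gen_ids
  rw [gen_ids_alt_eq]
  unfold gen_ids
  by_cases hn : 0 < n
  · have h0 : pvF (pvOff 1) = [] := by simp [pvF, pvOff]
    rw [← h0]
    exact loop_eq n.toNat n 1 (le_refl 1) (by simp [pvOff]; omega) (by simp [pvOff])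
  · rw [genLoop_exit n [] 1 (by simp; omega)]
    have hz : n.toNat = 0 := by omega
    simp [hz, pvF]
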